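-- pv_equiv track=rewrite | github.com/jmcmeen/bioamla | src/bioamla/fileutils.py | find_species_name
-- ===== SOURCE A (Python) =====
-- def find_species_name(category: str, all_categories: set) -> str:
--     """
--     Find the species name for a given category.
--
--     If the category is a subspecies (e.g., "Lithobates sphenocephalus utricularius"),
--     this will return the matching species name (e.g., "Lithobates sphenocephalus")
--     if it exists in the set of all categories.
--
--     Args:
--         category: The category name to check
--         all_categories: Set of all known category names
--
--     Returns:
--         The shortest matching species name, or the original category if no match
--     """
--     if not category:
--         return category
--
--     # Find all categories that are prefixes of this category
--     matching_species = [
--         c for c in all_categories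
--         if category.startswith(c) and c != category
--     ]
--
--     if matching_species:
--         # Return the shortest matching species (most general)
--         return min(matching_species, key=len)
--
--     return category
-- ===== SOURCE B (Python) =====
-- def find_species_name(category: str, all_categories: set) -> str:
--     # Scan prefixes of category from shortest to longest and return the first
--     # one present in the set; falls back to category itself.
--     for i in range(len(category)):
--         p = category[:i]
--         if p in all_categories:
--             return p
--     return category
-- ===== Notes on version B (the rewrite author's own statement) =====
-- stated objective: faster
-- what changed: Instead of filtering all N categories for prefixes of category and taking the min by length, B enumerates category's own prefixes from shortest to longest and returns the first one found in the set via O(1) hash lookups.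
import Mathlib
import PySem

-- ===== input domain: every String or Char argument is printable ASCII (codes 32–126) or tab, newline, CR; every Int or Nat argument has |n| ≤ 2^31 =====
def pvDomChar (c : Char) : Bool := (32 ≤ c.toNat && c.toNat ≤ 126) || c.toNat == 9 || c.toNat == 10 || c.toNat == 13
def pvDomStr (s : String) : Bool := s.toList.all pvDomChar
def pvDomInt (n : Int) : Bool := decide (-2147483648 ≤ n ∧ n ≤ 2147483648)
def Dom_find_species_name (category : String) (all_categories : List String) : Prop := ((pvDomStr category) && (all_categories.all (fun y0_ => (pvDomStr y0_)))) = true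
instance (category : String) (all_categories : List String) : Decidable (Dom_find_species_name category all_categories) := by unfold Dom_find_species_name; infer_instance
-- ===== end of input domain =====

-- B replaces A's scan over all categories with a scan over the prefixes of `category`
-- (shortest first), looked up in the set; equivalence of return values is proved below.


-- ===== PORT A =====
-- literal transliteration of A: early return on empty string, filter the set's
-- elements for proper prefixes, min by len (first minimal), else the category.
def find_species_name (category : String) (all_categories : List String) : String :=
  if category.toList = [] then category
  else
    let matching_species := all_categories.filter
      (fun c => PySem.Str.startswith category c && decide (c ≠ category))
    match PySem.List.min? matching_species (fun s => PySem.Str.len s) with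
    | some m => m
    | none => category

-- ===== PORT B =====
-- B's loop: `for i in range(len(category)): p = category[:i]; if p in all_categories: return p`
-- as counting recursion on the remaining number of iterations.
def pvAltLoop (category : String) (all_categories : List String) : Nat → Nat → String
  | _, 0 => category
  | i, fuel+1 =>
    let p := String.ofList (category.toList.take i)   -- category[:i]
    if PySem.Set.contains all_categories p then p
    else pvAltLoop category all_categories (i+1) fuel

def find_species_name_alt (category : String) (all_categories : List String) : String :=
  pvAltLoop category all_categories 0 category.toList.length

-- ===== PRECONDITION & SPEC =====
def Spec_find_species_name (category : String) (all_categories : List String) (out : String) : Prop := out = find_species_name_alt category all_categories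
instance (category : String) (all_categories : List String) (out : String) : Decidable (Spec_find_species_name category all_categories out) := by unfold Spec_find_species_name; infer_instance

-- ===== CLAIM (what is proved, stated in full; the proofs are below) =====
def Claim_equal_find_species_name : Prop := ∀ (category : String) (all_categories : List String), Dom_find_species_name category all_categories → Spec_find_species_name category all_categories (find_species_name category all_categories)

-- ===== LEMMAS AND PROOFS =====

-- B's loop returns `category` when no scanned prefix is in the set.
theorem pvAltLoop_none (category : String) (all : List String) :
    ∀ (fuel i : Nat),
      (∀ j, i ≤ j → j < i + fuel →
        ¬ PySem.Set.contains all (String.ofList (category.toList.take j)) = true) →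
      pvAltLoop category all i fuel = category := by
  intro fuel
  induction fuel with
  | zero => intro i _; rfl
  | succ f ih =>
    intro i h
    simp only [pvAltLoop]
    rw [if_neg (h i le_rfl (by omega))]
    exact ih (i + 1) (fun j hj hj' => h j (by omega) (by omega))

-- B's loop returns the first prefix (starting at index i) that is in the set.
theorem pvAltLoop_hit (category : String) (all : List String) :
    ∀ (fuel i i0 : Nat), i ≤ i0 → i0 < i + fuel →
      PySem.Set.contains all (String.ofList (category.toList.take i0)) = true →
      (∀ j, i ≤ j → j < i0 →
        ¬ PySem.Set.contains all (String.ofList (category.toList.take j)) = true) →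
      pvAltLoop category all i fuel = String.ofList (category.toList.take i0) := by
  intro fuel
  induction fuel with
  | zero => intro i i0 h1 h2; omega
  | succ f ih =>
    intro i i0 h1 h2 hP hmin
    simp only [pvAltLoop]
    by_cases hi : i = i0
    · subst hi; rw [if_pos hP]
    · rw [if_neg (hmin i le_rfl (by omega))]
      exact ih (i + 1) i0 (by omega) (by omega) hP
        (fun j hj hj' => hmin j (by omega) hj')

-- every element of A's `matching_species` is a proper prefix of `category` drawn from the set
theorem mem_matching (category : String) (all : List String) (c : String)
    (hc : c ∈ all.filter (fun c => PySem.Str.startswith category c && decide (c ≠ category))) :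
    c ∈ all ∧ c.toList = category.toList.take c.toList.length ∧
      c.toList.length < category.toList.length := by
  rw [List.mem_filter] at hc
  obtain ⟨hmem, hcond⟩ := hc
  simp only [Bool.and_eq_true, decide_eq_true_eq, PySem.Str.startswith_eq,
    PySem.Chars.startswith_iff] at hcond
  obtain ⟨hpre, hne⟩ := hcond
  have heq : c.toList = category.toList.take c.toList.length :=
    List.prefix_iff_eq_take.mp hpre
  refine ⟨hmem, heq, ?_⟩
  have hle : c.toList.length ≤ category.toList.length := hpre.length_le
  rcases lt_or_eq_of_le hle with h | h
  · exact h
  · exfalso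
    apply hne
    apply String.toList_inj.mp
    rw [heq, h, List.take_length]

theorem find_species_name_spec' (category : String) (all : List String) :
    find_species_name category all = find_species_name_alt category all := by
  by_cases hempty : category.toList = []
  · simp only [find_species_name, find_species_name_alt, hempty, List.length_nil]
    rfl
  · set n := category.toList.length with hn
    have hP : DecidablePred (fun i =>
        PySem.Set.contains all (String.ofList (category.toList.take i)) = true) := by
      infer_instance
    by_cases hex : ∃ i, i < n ∧
        PySem.Set.contains all (String.ofList (category.toList.take i)) = true
    · -- some prefix is in the set: both return the shortest one
      obtain ⟨iw, hiw⟩ := hex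
      have hex' : ∃ i, i < n ∧
          PySem.Set.contains all (String.ofList (category.toList.take i)) = true := ⟨iw, hiw⟩
      set i0 := Nat.find hex' with hi0def
      obtain ⟨hi0n, hi0P⟩ := Nat.find_spec hex'
      have hleast : ∀ j, j < i0 →
          ¬ PySem.Set.contains all (String.ofList (category.toList.take j)) = true := by
        intro j hj hPj
        have hjn : j < n := lt_trans hj hi0n
        exact (Nat.find_min hex' hj) ⟨hjn, hPj⟩
      -- B side
      have hB : find_species_name_alt category all
          = String.ofList (category.toList.take i0) := by
        unfold find_species_name_alt
        exact pvAltLoop_hit category all n 0 i0 (Nat.zero_le _) (by omega) hi0P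
          (fun j _ hj => hleast j hj)
      -- the shortest prefix as a string
      set c0 := String.ofList (category.toList.take i0) with hc0
      have hc0list : c0.toList = category.toList.take i0 := by simp [hc0]
      have hc0len : c0.toList.length = i0 := by
        rw [hc0list, List.length_take]; omega
      -- c0 is in A's matching list
      have hc0mem : c0 ∈ all.filter
          (fun c => PySem.Str.startswith category c && decide (c ≠ category)) := by
        rw [List.mem_filter]
        constructor
        · exact (PySem.Set.contains_iff all c0).mp hi0P
        · simp only [Bool.and_eq_true, decide_eq_true_eq, PySem.Str.startswith_eq,
            PySem.Chars.startswith_iff]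
          constructor
          · rw [hc0list]; exact List.take_prefix _ _
          · intro habs
            have : c0.toList = category.toList := by rw [habs]
            have : i0 = n := by rw [← hc0len, this]
            omega
      -- A side
      unfold find_species_name
      rw [if_neg hempty]
      cases hmin : PySem.List.min? (all.filter
          (fun c => PySem.Str.startswith category c && decide (c ≠ category)))
          (fun s => PySem.Str.len s) with
      | none =>
        exfalso
        rw [PySem.List.min?_eq_none_iff] at hmin
        rw [hmin] at hc0mem
        exact List.not_mem_nil hc0mem
      | some m =>
        simp only [hmin]
        obtain ⟨hmall, hmtake, hmlen⟩ := mem_matching category all m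
          (PySem.List.min?_mem hmin)
        set k := m.toList.length with hk
        -- P k holds, so i0 ≤ k
        have hPk : PySem.Set.contains all (String.ofList (category.toList.take k)) = true := by
          rw [← hmtake]
          simp only [String.ofList_toList]
          exact (PySem.Set.contains_iff all m).mpr hmall
        have hi0k : i0 ≤ k := by
          by_contra habs
          exact hleast k (by omega) hPk
        -- m has minimal key, so k ≤ i0
        have hki0 : k ≤ i0 := by
          have := PySem.List.min?_isMin hmin c0 hc0mem
          simp only [PySem.Str.len_eq] at this
          have : (m.toList.length : Int) ≤ (c0.toList.length : Int) := this
          rw [hc0len] at this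
          exact_mod_cast this
        have hki0' : k = i0 := le_antisymm hki0 hi0k
        rw [hB]
        apply String.toList_inj.mp
        rw [hc0list, hmtake, hki0']
    · -- no prefix in the set: both return `category`
      push Not at hex
      have hB : find_species_name_alt category all = category := by
        unfold find_species_name_alt
        apply pvAltLoop_none
        intro j _ hj hPj
        exact absurd hPj (hex j (by omega))
      unfold find_species_name
      rw [if_neg hempty]
      cases hmin : PySem.List.min? (all.filter
          (fun c => PySem.Str.startswith category c && decide (c ≠ category)))
          (fun s => PySem.Str.len s) with
      | none => simp only [hmin]; exact hB.symm
      | some m =>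
        exfalso
        obtain ⟨hmall, hmtake, hmlen⟩ := mem_matching category all m
          (PySem.List.min?_mem hmin)
        apply hex m.toList.length hmlen
        rw [← hmtake]
        simp only [String.ofList_toList]
        exact (PySem.Set.contains_iff all m).mpr hmall

-- ===== VERDICT (by name: the statement is the Claim_ definition above) =====
theorem find_species_name_spec : Claim_equal_find_species_name := by
  intro category all _
  unfold Spec_find_species_name
  exact find_species_name_spec' category all
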